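-- pv_equiv track=rewrite | github.com/Vendron/longitudinal-machine-learning | src/lstm/long_lstm_classifier.py | group_features_by_waves
-- ===== SOURCE A (Python) =====
-- def group_features_by_waves(column_names):
--     """Group features by their respective waves."""
--     wave_identifiers = sorted(set(col.split('_')[-1] for col in column_names if col not in ['sex', 'indager_wave8', 'dheas_wave4', 'apoe_wave2']))
--     features_by_wave = {wave: [] for wave in wave_identifiers}
--
--     for col in column_names:
--         if col not in ['sex', 'indager_wave8', 'dheas_wave4', 'apoe_wave2']:
--             wave = col.split('_')[-1]
--             features_by_wave[wave].append(col)
--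
--     return features_by_wave, wave_identifiers
-- ===== SOURCE B (Python) =====
-- def group_features_by_waves(column_names):
--     """Group features by their respective waves."""
--     excluded = {'sex', 'indager_wave8', 'dheas_wave4', 'apoe_wave2'}
--     kept = sorted((c for c in column_names if c not in excluded),
--                   key=lambda c: c.split('_')[-1])
--     features_by_wave = {}
--     wave_identifiers = []
--     for c in kept:
--         w = c.split('_')[-1]
--         if not wave_identifiers or wave_identifiers[-1] != w:
--             wave_identifiers.append(w)
--             features_by_wave[w] = []
--         features_by_wave[w].append(c)
--     return features_by_wave, wave_identifiers
-- ===== Notes on version B (the rewrite author's own statement) =====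
-- stated objective: alternative
-- what changed: Replaces A's hash-grouping (suffix set + sort, pre-seeded dict, second scan) with a sort-then-scan algorithm: stably sort the kept columns by wave suffix, then one linear scan over the sorted list that starts a new group whenever the suffix changes, yielding the sorted wave list and the groups in one pass with no key lookups.
import Mathlib
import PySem

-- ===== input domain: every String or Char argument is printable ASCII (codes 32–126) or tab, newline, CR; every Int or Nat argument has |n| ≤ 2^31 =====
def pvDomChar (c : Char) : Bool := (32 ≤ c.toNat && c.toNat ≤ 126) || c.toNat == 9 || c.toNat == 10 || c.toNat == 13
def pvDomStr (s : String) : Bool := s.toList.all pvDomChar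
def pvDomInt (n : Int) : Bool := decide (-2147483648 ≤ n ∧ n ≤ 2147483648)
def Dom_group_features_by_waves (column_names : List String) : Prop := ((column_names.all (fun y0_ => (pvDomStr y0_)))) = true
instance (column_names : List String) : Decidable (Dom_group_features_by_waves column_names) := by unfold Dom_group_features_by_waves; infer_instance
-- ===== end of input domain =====

-- B replaces A's hash-grouping (suffix set + sort, pre-seeded dict, second scan) with
-- sort-then-scan: stably sort the kept columns by suffix, then one run-detecting scan
-- builds the sorted wave list and the groups together (objective: alternative).

-- shared helpers: both Pythons test `col not in [...]` / `col in excluded` and compute `col.split('_')[-1]`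
def pvExcl (col : String) : Bool :=
  ["sex", "indager_wave8", "dheas_wave4", "apoe_wave2"].contains col

def pvSuffix (col : String) : String :=
  PySem.List.pyGetD ((PySem.Str.split? col "_").getD []) (-1) ""

-- ===== PORT A =====
def group_features_by_waves (column_names : List String) : (List (String × List String)) × List String :=
  let wave_identifiers :=
    PySem.List.sorted
      (PySem.Set.ofList ((column_names.filter (fun col => !pvExcl col)).map pvSuffix))
      (fun x => x) false
  let init : PySem.Dict String (List String) :=
    wave_identifiers.foldl (fun d wave => d.insert wave []) PySem.Dict.empty
  let features_by_wave :=
    column_names.foldl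
      (fun d col =>
        if pvExcl col then d
        else d.modify (pvSuffix col) [] (fun v => v ++ [col]))
      init
  (features_by_wave.items, wave_identifiers)

-- ===== PORT B =====
-- the loop body of B's single scan over the sorted kept columns
def pvStepB (st : PySem.Dict String (List String) × List String) (c : String) :
    PySem.Dict String (List String) × List String :=
  let w := pvSuffix c
  let st' := if st.2.getLast? ≠ some w then (st.1.insert w [], st.2 ++ [w]) else st
  (st'.1.modify w [] (fun v => v ++ [c]), st'.2)

def group_features_by_waves_alt (column_names : List String) : (List (String × List String)) × List String :=
  let kept := column_names.filter (fun c => !pvExcl c)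
  let sortedKept := PySem.List.sorted kept pvSuffix false
  let st := sortedKept.foldl pvStepB (PySem.Dict.empty, [])
  (st.1.items, st.2)

-- ===== PRECONDITION & SPEC =====
def Spec_group_features_by_waves (column_names : List String) (out : (List (String × List String)) × List String) : Prop := out = group_features_by_waves_alt column_names
instance (column_names : List String) (out : (List (String × List String)) × List String) : Decidable (Spec_group_features_by_waves column_names out) := by unfold Spec_group_features_by_waves; infer_instance

-- ===== CLAIM =====
def Claim_equal_group_features_by_waves : Prop := ∀ (column_names : List String), Dom_group_features_by_waves column_names → Spec_group_features_by_waves column_names (group_features_by_waves column_names)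

-- ===== LEMMAS AND PROOFS =====

-- the grouping step A folds with
def pvStep (d : PySem.Dict String (List String)) (col : String) : PySem.Dict String (List String) :=
  d.modify (pvSuffix col) [] (fun v => v ++ [col])

theorem pv_fold_filter (l : List String) (d : PySem.Dict String (List String)) :
    l.foldl (fun d col => if pvExcl col then d else pvStep d col) d
      = (l.filter (fun col => !pvExcl col)).foldl pvStep d := by
  rw [← PySem.List.foldl_if_eq_foldl_filter]
  apply PySem.List.foldl_congr_mem
  intro acc x _
  cases h : pvExcl x
  · simp
  · simp

theorem pv_foldl_add_of_not_mem (l : List String) (s : List String)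
    (h : ∀ x ∈ l, x ∉ s) (hnd : l.Nodup) :
    l.foldl PySem.Set.add s = s ++ l := by
  induction l generalizing s with
  | nil => simp
  | cons x t ih =>
    simp only [List.foldl_cons]
    have hx : PySem.Set.add s x = s ++ [x] := by
      have hm : x ∉ s := h x (by simp)
      simp [PySem.Set.add, hm]
    rw [hx, ih]
    · simp
    · intro y hy
      simp only [List.mem_append, List.mem_singleton]
      rintro (hys | rfl)
      · exact h y (by simp [hy]) hys
      · exact (List.nodup_cons.mp hnd).1 hy
    · exact (List.nodup_cons.mp hnd).2

theorem pv_ofList_of_nodup (l : List String) (hnd : l.Nodup) :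
    PySem.Set.ofList l = l := by
  have := pv_foldl_add_of_not_mem l [] (by simp) hnd
  simpa [PySem.Set.ofList_eq_foldl] using this

theorem pv_update_of_subset (l : List String) (s : List String)
    (h : ∀ x ∈ l, x ∈ s) :
    PySem.Set.update s l = s := by
  induction l generalizing s with
  | nil => simp [PySem.Set.update]
  | cons x t ih =>
    have hx : PySem.Set.add s x = s := by
      have hm : x ∈ s := h x (by simp)
      simp [PySem.Set.add, hm]
    simp only [PySem.Set.update, List.foldl_cons] at *
    rw [hx, ih s (fun y hy => h y (by simp [hy]))]

theorem pv_getD_init (l : List String) (d : PySem.Dict String (List String))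
    (h : ∀ w, d.getD w [] = []) (w : String) :
    (l.foldl (fun d x => d.insert x ([] : List String)) d).getD w [] = [] := by
  induction l generalizing d with
  | nil => exact h w
  | cons x t ih =>
    simp only [List.foldl_cons]
    exact ih _ (fun w => by rw [PySem.Dict.getD_insert]; split <;> simp [h])

theorem pv_getD_group (l : List String) (d : PySem.Dict String (List String)) (w : String) :
    (l.foldl pvStep d).getD w []
      = d.getD w [] ++ (l.filter (fun col => pvSuffix col == w)) := by
  have : l.foldl pvStep d
      = (l.map (fun c => (pvSuffix c, c))).foldl
          (fun d p => d.modify p.1 [] (fun v => v ++ [p.2])) d := by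
    rw [List.foldl_map]; rfl
  rw [this, PySem.Dict.getD_foldl_modify_append, List.filter_map]
  simp [Function.comp_def]

theorem pv_keys_group (l : List String) (d : PySem.Dict String (List String)) :
    (l.foldl pvStep d).keys = PySem.Set.update d.keys (l.map pvSuffix) := by
  exact PySem.Dict.keys_foldl_modify_key (l := l) (key := pvSuffix)
    (f := fun _ col => (fun v => v ++ [col])) (d0 := ([] : List String)) (d := d)

-- ----- B-side lemmas -----

-- foldl of Set.add yields a sublist of s ++ l (used to transfer sortedness to the dedup)
theorem pv_foldl_add_sublist (l : List String) (s : List String) :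
    (l.foldl PySem.Set.add s).Sublist (s ++ l) := by
  induction l generalizing s with
  | nil => simp
  | cons x t ih =>
    simp only [List.foldl_cons, PySem.Set.add]
    by_cases h : PySem.Set.contains s x = true
    · rw [if_pos h]
      exact (ih s).trans (by
        refine List.Sublist.append_left ?_ s
        exact List.sublist_cons_self x t)
    · rw [if_neg h]
      have := ih (s ++ [x])
      simpa using this

theorem pv_ofList_sublist (l : List String) :
    (PySem.Set.ofList l).Sublist l := by
  have := pv_foldl_add_sublist l []
  simpa [PySem.Set.ofList_eq_foldl] using this

-- in a strictly increasing list, an element ≥ every element is the last one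
theorem pv_mem_last (W : List String) (hW : W.Pairwise (· < ·)) (x : String)
    (hx : x ∈ W) (hmax : ∀ w ∈ W, w ≤ x) : W.getLast? = some x := by
  induction W using List.reverseRecOn with
  | nil => simp at hx
  | append_singleton ys y _ =>
    rw [List.getLast?_concat]
    rcases List.mem_append.mp hx with hys | hy
    · exfalso
      have h1 : x < y := (List.pairwise_append.mp hW).2.2 x hys y (by simp)
      have h2 : y ≤ x := hmax y (by simp)
      exact absurd h1 (not_lt.mpr h2)
    · simp at hy; simp [hy]

-- filter of a stable insert commutes with appending the new element of the same key
theorem pv_filter_insertBy (w x : String) (ys : List String)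
    (h : ys.Pairwise (fun a b => pvSuffix a ≤ pvSuffix b)) :
    (PySem.List.insertBy (fun a b => decide (pvSuffix a < pvSuffix b)) x ys).filter
        (fun c => pvSuffix c == w)
      = if pvSuffix x == w then ys.filter (fun c => pvSuffix c == w) ++ [x]
        else ys.filter (fun c => pvSuffix c == w) := by
  induction ys with
  | nil =>
    by_cases hx : (pvSuffix x == w) = true
    · simp [PySem.List.insertBy, hx]
    · simp [PySem.List.insertBy, hx]
  | cons y t ih =>
    simp only [PySem.List.insertBy]
    by_cases hlt : pvSuffix x < pvSuffix y
    · rw [if_pos (by simp [hlt])]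
      by_cases hx : pvSuffix x = w
      · have hnone : ∀ c ∈ y :: t, ¬ (pvSuffix c == w) = true := by
          intro c hc hcw
          have hyc : pvSuffix y ≤ pvSuffix c := by
            rcases List.mem_cons.mp hc with rfl | hc2
            · exact le_refl _
            · exact (List.pairwise_cons.mp h).1 c hc2
          have : w < pvSuffix c := lt_of_lt_of_le (hx ▸ hlt) hyc
          exact absurd (eq_of_beq hcw) (ne_of_gt this)
        have hfil : (y :: t).filter (fun c => pvSuffix c == w) = [] := by
          apply List.filter_eq_nil_iff.mpr
          intro c hc
          simpa using hnone c hc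
        have hxb : (pvSuffix x == w) = true := by simp [hx]
        rw [List.filter_cons, hfil]
        simp [hxb]
      · have hxw : (pvSuffix x == w) = false := by simp [hx]
        rw [List.filter_cons]
        simp [hxw]
    · rw [if_neg (by simp [hlt])]
      have ht := (List.pairwise_cons.mp h).2
      rw [List.filter_cons, List.filter_cons, ih ht]
      by_cases hy : (pvSuffix y == w) = true <;> by_cases hx : (pvSuffix x == w) = true <;>
        simp [hy, hx]

-- STABILITY: filtering one suffix class out of the stable sort gives the original order
theorem pv_filter_sorted (l : List String) (w : String) :
    (PySem.List.sorted l pvSuffix false).filter (fun c => pvSuffix c == w)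
      = l.filter (fun c => pvSuffix c == w) := by
  induction l using List.reverseRecOn with
  | nil => simp [(PySem.List.sorted_eq_nil_iff ([] : List String) pvSuffix false).mpr rfl]
  | append_singleton t x ih =>
    have hstep : PySem.List.sorted (t ++ [x]) pvSuffix false
        = PySem.List.insertBy (fun a b => decide (pvSuffix a < pvSuffix b)) x
            (PySem.List.sorted t pvSuffix false) := by
      rw [PySem.List.sorted_eq_foldl_insertBy, PySem.List.sorted_eq_foldl_insertBy,
        List.foldl_append, List.foldl_cons, List.foldl_nil]
    rw [hstep, pv_filter_insertBy w x _ (PySem.List.sorted_pairwise t pvSuffix), ih,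
      List.filter_append, List.filter_cons]
    by_cases hx : (pvSuffix x == w) = true <;> simp [hx]

-- the invariant of B's single scan over the (suffix-)sorted list
theorem pv_foldB (s : List String) (d : PySem.Dict String (List String)) (W : List String)
    (hs : (s.map pvSuffix).Pairwise (· ≤ ·))
    (hW : W.Pairwise (· < ·))
    (hkeys : d.keys = W)
    (hbound : ∀ w ∈ W, ∀ c ∈ s, w ≤ pvSuffix c) :
    (s.foldl pvStepB (d, W)).2 = PySem.Set.update W (s.map pvSuffix)
    ∧ (s.foldl pvStepB (d, W)).1.keys = PySem.Set.update W (s.map pvSuffix)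
    ∧ ∀ w, (s.foldl pvStepB (d, W)).1.getD w []
        = d.getD w [] ++ (s.filter (fun c => pvSuffix c == w)) := by
  induction s generalizing d W with
  | nil =>
    refine ⟨by simp [PySem.Set.update], by simpa [PySem.Set.update] using hkeys, ?_⟩
    intro w; simp
  | cons c t ih =>
    have hhead : ∀ c' ∈ t, pvSuffix c ≤ pvSuffix c' := by
      intro c' hc'
      have := (List.pairwise_cons.mp hs).1 (pvSuffix c') (List.mem_map_of_mem hc')
      exact this
    have ht : (t.map pvSuffix).Pairwise (· ≤ ·) := (List.pairwise_cons.mp hs).2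
    have hboundc : ∀ w ∈ W, w ≤ pvSuffix c := fun w hw => hbound w hw c (by simp)
    simp only [List.foldl_cons]
    by_cases hcond : W.getLast? ≠ some (pvSuffix c)
    · -- new-key branch
      have hnot : pvSuffix c ∉ W := by
        intro hmem
        exact hcond (pv_mem_last W hW (pvSuffix c) hmem hboundc)
      have hncont : d.contains (pvSuffix c) = false := by
        cases h : d.contains (pvSuffix c)
        · rfl
        · exact absurd (hkeys ▸ (PySem.Dict.contains_iff_mem_keys d (pvSuffix c)).mp h) hnot
      have hstepeq : pvStepB (d, W) c
          = ((d.insert (pvSuffix c) []).modify (pvSuffix c) [] (fun v => v ++ [c]),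
             W ++ [pvSuffix c]) := by
        simp [pvStepB, hcond]
      have hW' : (W ++ [pvSuffix c]).Pairwise (· < ·) := by
        rw [List.pairwise_append]
        refine ⟨hW, by simp, ?_⟩
        intro a ha b hb
        simp only [List.mem_singleton] at hb
        subst hb
        exact lt_of_le_of_ne (hboundc a ha) (fun h => hnot (h ▸ ha))
      have hkeys' : ((d.insert (pvSuffix c) []).modify (pvSuffix c) []
          (fun v => v ++ [c])).keys = W ++ [pvSuffix c] := by
        rw [PySem.Dict.keys_modify, PySem.Dict.insert_insert_self,
          PySem.Dict.keys_insert_of_not_contains _ _ hncont, hkeys]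
      have hbound' : ∀ w ∈ W ++ [pvSuffix c], ∀ c' ∈ t, w ≤ pvSuffix c' := by
        intro w hw c' hc'
        rcases List.mem_append.mp hw with hw | hw
        · exact hbound w hw c' (by simp [hc'])
        · simp only [List.mem_singleton] at hw
          exact hw ▸ hhead c' hc'
      obtain ⟨h2, hk, hv⟩ := ih _ _ ht hW' hkeys' hbound'
      have hupd : PySem.Set.update W ((c :: t).map pvSuffix)
          = PySem.Set.update (W ++ [pvSuffix c]) (t.map pvSuffix) := by
        have hadd : PySem.Set.add W (pvSuffix c) = W ++ [pvSuffix c] := by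
          simp [PySem.Set.add, hnot]
        simp [PySem.Set.update, hadd]
      refine ⟨?_, ?_, ?_⟩
      · rw [hstepeq, h2, hupd]
      · rw [hstepeq, hk, hupd]
      · intro w
        rw [hstepeq, hv w, PySem.Dict.getD_modify, PySem.Dict.getD_insert]
        by_cases hw : w = pvSuffix c
        · subst hw
          have hd : d.getD (pvSuffix c) [] = [] :=
            PySem.Dict.getD_of_not_contains d [] hncont
          simp [hd, List.filter_cons]
        · have hcw : (pvSuffix c == w) = false := by
            simp [hw]; exact fun h => hw h.symm
          simp [hw, hcw, PySem.Dict.getD_insert]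
    · -- existing-run branch: last wave equals this suffix
      push_neg at hcond
      have hmem : pvSuffix c ∈ W := by
        rcases List.getLast?_eq_some_iff.mp hcond with ⟨ys, rfl⟩
        simp
      have hcont : d.contains (pvSuffix c) = true :=
        (PySem.Dict.contains_iff_mem_keys d (pvSuffix c)).mpr (hkeys ▸ hmem)
      have hstepeq : pvStepB (d, W) c
          = (d.modify (pvSuffix c) [] (fun v => v ++ [c]), W) := by
        simp [pvStepB, hcond]
      have hkeys' : (d.modify (pvSuffix c) [] (fun v => v ++ [c])).keys = W := by
        rw [PySem.Dict.keys_modify, PySem.Dict.keys_insert_of_contains, hkeys]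
        exact hcont
      have hbound' : ∀ w ∈ W, ∀ c' ∈ t, w ≤ pvSuffix c' :=
        fun w hw c' hc' => hbound w hw c' (by simp [hc'])
      obtain ⟨h2, hk, hv⟩ := ih _ _ ht hW hkeys' hbound'
      have hupd : PySem.Set.update W ((c :: t).map pvSuffix)
          = PySem.Set.update W (t.map pvSuffix) := by
        have hadd : PySem.Set.add W (pvSuffix c) = W := by
          simp [PySem.Set.add, hmem]
        simp [PySem.Set.update, hadd]
      refine ⟨?_, ?_, ?_⟩
      · rw [hstepeq, h2, hupd]
      · rw [hstepeq, hk, hupd]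
      · intro w
        rw [hstepeq, hv w, PySem.Dict.getD_modify]
        by_cases hw : w = pvSuffix c
        · subst hw
          simp [List.filter_cons]
        · have hcw : (pvSuffix c == w) = false := by
            simp [hw]; exact fun h => hw h.symm
          simp [hw, List.filter_cons, hcw]

theorem group_features_by_waves_spec : Claim_equal_group_features_by_waves := by
  intro column_names _
  unfold Spec_group_features_by_waves group_features_by_waves group_features_by_waves_alt
  simp only []
  set kept := column_names.filter (fun col => !pvExcl col) with hkept
  set sfx := kept.map pvSuffix with hsfx
  set WA := PySem.List.sorted (PySem.Set.ofList sfx) (fun x => x) false with hWA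
  set s := PySem.List.sorted kept pvSuffix false with hsdef
  set init : PySem.Dict String (List String) :=
    WA.foldl (fun d wave => d.insert wave []) PySem.Dict.empty with hinit
  -- A-side facts
  have hWAnd : WA.Nodup := (PySem.List.sorted_perm _ _ _).nodup_iff.mpr (PySem.Set.nodup_ofList sfx)
  have hWAmem : ∀ x ∈ sfx, x ∈ WA := by
    intro x hx
    rw [hWA, PySem.List.mem_sorted, PySem.Set.mem_ofList]
    exact hx
  have hfoldA := pv_fold_filter column_names init
  have hkeysInit : init.keys = WA := by
    rw [hinit, PySem.Dict.keys_foldl_insert (f := fun _ _ => ([] : List String))]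
    simp only [PySem.Dict.keys_empty]
    rw [PySem.Set.update_nil_left, pv_ofList_of_nodup WA hWAnd]
  have hkeysA : (kept.foldl pvStep init).keys = WA := by
    rw [pv_keys_group, hkeysInit, pv_update_of_subset _ _ hWAmem]
  have hvalsA : ∀ w, (kept.foldl pvStep init).getD w []
      = kept.filter (fun c => pvSuffix c == w) := by
    intro w
    rw [pv_getD_group, hinit, pv_getD_init _ _ (fun w => PySem.Dict.getD_empty _ _)]
    simp
  have hndA : (kept.foldl pvStep init).keys.Nodup := by rw [hkeysA]; exact hWAnd
  -- B-side: run the scan invariant from the empty state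
  have hspw : (s.map pvSuffix).Pairwise (· ≤ ·) := by
    rw [hsdef]; exact PySem.List.sorted_map_key_pairwise kept pvSuffix
  obtain ⟨hB2, hBkeys, hBvals⟩ := pv_foldB s PySem.Dict.empty []
    hspw (by simp) (by simp) (by simp)
  -- B's wave list equals A's
  have hperm : (PySem.Set.ofList (s.map pvSuffix)).Perm (PySem.Set.ofList sfx) := by
    rw [List.perm_ext_iff_of_nodup (PySem.Set.nodup_ofList _) (PySem.Set.nodup_ofList _)]
    intro a
    rw [PySem.Set.mem_ofList, PySem.Set.mem_ofList, hsfx]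
    constructor
    · intro h
      exact ((PySem.List.sorted_perm kept pvSuffix false).map pvSuffix).mem_iff.mp h
    · intro h
      exact ((PySem.List.sorted_perm kept pvSuffix false).map pvSuffix).mem_iff.mpr h
  have hWeq : PySem.Set.ofList (s.map pvSuffix) = WA := by
    rw [hWA]
    exact (PySem.List.sorted_id_eq_of_perm_of_pairwise _ _ hperm
      (List.Pairwise.sublist (pv_ofList_sublist _) hspw)).symm
  have hupd0 : PySem.Set.update [] (s.map pvSuffix) = WA := by
    rw [PySem.Set.update_nil_left, hWeq]
  -- assemble
  have hBkeys' : (s.foldl pvStepB (PySem.Dict.empty, [])).1.keys = WA := by rw [hBkeys, hupd0]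
  have hBvals' : ∀ w, (s.foldl pvStepB (PySem.Dict.empty, [])).1.getD w []
      = kept.filter (fun c => pvSuffix c == w) := by
    intro w
    rw [hBvals w, PySem.Dict.getD_empty]
    rw [hsdef, pv_filter_sorted]
    simp
  simp only [pvStep] at hfoldA hkeysA hvalsA hndA
  refine Prod.ext ?_ ?_
  · rw [hfoldA]
    rw [PySem.Dict.items_eq_map_keys _ hndA [], hkeysA,
      PySem.Dict.items_eq_map_keys _ (by rw [hBkeys']; exact hWAnd) []]
    rw [hBkeys']
    exact List.map_congr_left (fun w _ => by rw [hvalsA w, hBvals' w])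
  · rw [hB2, hupd0]
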